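-- pv_equiv track=rewrite | github.com/jackpeta/cs-1301-gatech | CS 1301-B/HW06.py | stayInSchool
-- ===== SOURCE A (Python) =====
-- def stayInSchool(people, networth, gender):
--
--     stJudeList = []
--     constanceBillardList = []
--
--     for position,person in enumerate(people):
--         if gender[position] == 'boy' and networth[position] >= 1:
--             stJudeList.append(person)
--         elif gender[position] == 'girl' and networth[position] >= 1:
--             constanceBillardList.append(person)
--
--     stJudeList.sort()
--     constanceBillardList.sort()
--
--     if len(stJudeList) >= 1 and len(constanceBillardList) == 0:
--         return {'St. Jude': stJudeList}
--
--     elif len(stJudeList) == 0 and len(constanceBillardList) >= 1: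
--         return {'Constance Billard': constanceBillardList}
--
--     elif len(stJudeList) == 0 and len(constanceBillardList) == 0:
--         return {}
--
--     else:
--         return {'St. Jude': stJudeList, 'Constance Billard': constanceBillardList}
-- ===== SOURCE B (Python) =====
-- _SCHOOL_OF = {'boy': 'St. Jude', 'girl': 'Constance Billard'}
--
-- def _insert_sorted(lst, x):
--     # insert x into the sorted list lst, after any equal elements
--     for i, y in enumerate(lst):
--         if x < y:
--             lst.insert(i, x)
--             return
--     lst.append(x)
--
-- def stayInSchool(people, networth, gender):
--     # Online insertion sort into per-school rosters selected through a
--     # gender->school mapping; the output keeps only non-empty rosters.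
--     rosters = {'St. Jude': [], 'Constance Billard': []}
--     for i, person in enumerate(people):
--         school = _SCHOOL_OF.get(gender[i])
--         if school is not None and networth[i] >= 1:
--             _insert_sorted(rosters[school], person)
--     return {school: members for school, members in rosters.items() if members}
-- ===== Notes on version B (the rewrite author's own statement) =====
-- stated objective: alternative
-- what changed: B replaces A's partition-into-two-lists-then-two-builtin-sorts with an online insertion sort: a gender->school dict selects the roster and each qualifying person is inserted into its sorted position as it is encountered, the output dict keeping only non-empty rosters.
import Mathlib
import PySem

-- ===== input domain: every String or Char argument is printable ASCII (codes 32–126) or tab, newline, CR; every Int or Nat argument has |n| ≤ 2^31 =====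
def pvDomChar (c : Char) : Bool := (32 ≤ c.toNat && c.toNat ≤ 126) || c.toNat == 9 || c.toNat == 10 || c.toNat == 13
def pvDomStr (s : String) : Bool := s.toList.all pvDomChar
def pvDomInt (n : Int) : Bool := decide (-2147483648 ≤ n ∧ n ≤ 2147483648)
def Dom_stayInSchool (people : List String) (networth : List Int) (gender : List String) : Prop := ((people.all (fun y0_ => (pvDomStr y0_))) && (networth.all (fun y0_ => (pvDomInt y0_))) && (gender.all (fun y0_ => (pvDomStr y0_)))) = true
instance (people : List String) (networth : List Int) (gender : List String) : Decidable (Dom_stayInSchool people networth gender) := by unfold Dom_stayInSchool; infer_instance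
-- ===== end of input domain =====

-- B replaces partition-then-two-sorts by an online insertion sort into
-- per-school rosters chosen through a gender->school dict; same return value.

-- ===== PORT A =====
def stayInSchool (people : List String) (networth : List Int) (gender : List String) : List (String × List String) :=
  let lists := (PySem.List.enumerate people 0).foldl
    (fun (acc : List String × List String) pp =>
      if (PySem.List.pyGetD gender pp.1 "" == "boy") && decide (1 ≤ PySem.List.pyGetD networth pp.1 0) then
        (acc.1 ++ [pp.2], acc.2)
      else if (PySem.List.pyGetD gender pp.1 "" == "girl") && decide (1 ≤ PySem.List.pyGetD networth pp.1 0) then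
        (acc.1, acc.2 ++ [pp.2])
      else acc) ([], [])
  let sjs := PySem.List.sorted lists.1 (fun x => x) false
  let cbs := PySem.List.sorted lists.2 (fun x => x) false
  if sjs.length ≥ 1 ∧ cbs.length = 0 then [("St. Jude", sjs)]
  else if sjs.length = 0 ∧ cbs.length ≥ 1 then [("Constance Billard", cbs)]
  else if sjs.length = 0 ∧ cbs.length = 0 then []
  else [("St. Jude", sjs), ("Constance Billard", cbs)]

-- ===== PORT B =====
-- _SCHOOL_OF
def schoolOfDict : PySem.Dict String String :=
  PySem.Dict.mk [("boy", "St. Jude"), ("girl", "Constance Billard")]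

-- _insert_sorted: the front-to-back scan that inserts x before the first
-- strictly greater element (appends at the end otherwise)
def insertSorted (lst : List String) (x : String) : List String :=
  match lst with
  | [] => [x]
  | y :: ys => if x < y then x :: y :: ys else y :: insertSorted ys x

-- the body of B's loop over enumerate(people)
def altStep (gender : List String) (networth : List Int)
    (r : PySem.Dict String (List String)) (pp : Int × String) : PySem.Dict String (List String) :=
  match schoolOfDict.get? (PySem.List.pyGetD gender pp.1 "") with
  | some school =>
      if decide (1 ≤ PySem.List.pyGetD networth pp.1 0) then
        PySem.Dict.insert r school (insertSorted (PySem.Dict.getD r school []) pp.2)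
      else r
  | none => r

def stayInSchool_alt (people : List String) (networth : List Int) (gender : List String) : List (String × List String) :=
  let rosters : PySem.Dict String (List String) :=
    PySem.Dict.mk [("St. Jude", []), ("Constance Billard", [])]
  let rosters := (PySem.List.enumerate people 0).foldl (altStep gender networth) rosters
  rosters.items.filter (fun kv => !kv.2.isEmpty)

-- ===== PRECONDITION & SPEC =====
-- Pre_ excludes exactly the inputs on which the Python A raises IndexError:
-- gender shorter than people, or networth too short at a position whose gender
-- is 'boy' or 'girl' (only there networth is read).
def Pre_stayInSchool (people : List String) (networth : List Int) (gender : List String) : Prop :=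
  people.length ≤ gender.length ∧
  ∀ i, i < people.length → (gender.getD i "" = "boy" ∨ gender.getD i "" = "girl") → i < networth.length
instance (people : List String) (networth : List Int) (gender : List String) : Decidable (Pre_stayInSchool people networth gender) := by unfold Pre_stayInSchool; infer_instance
def pvWitness_stayInSchool : List String × List Int × List String :=
  (["bob", "alice", "carl"], [5, 3, 0], ["boy", "girl", "boy"])

def Spec_stayInSchool (people : List String) (networth : List Int) (gender : List String) (out : List (String × List String)) : Prop := out = stayInSchool_alt people networth gender
instance (people : List String) (networth : List Int) (gender : List String) (out : List (String × List String)) : Decidable (Spec_stayInSchool people networth gender out) := by unfold Spec_stayInSchool; infer_instance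

-- ===== CLAIM (what is proved, stated in full; the proofs are below) =====
def Claim_equal_stayInSchool : Prop := ∀ (people : List String) (networth : List Int) (gender : List String), Dom_stayInSchool people networth gender → Pre_stayInSchool people networth gender → Spec_stayInSchool people networth gender (stayInSchool people networth gender)

-- ===== LEMMAS AND PROOFS =====

theorem insertSorted_perm (x : String) : ∀ (l : List String), (insertSorted l x).Perm (x :: l) := by
  intro l
  induction l with
  | nil => simp [insertSorted]
  | cons y ys ih =>
    by_cases h : x < y
    · simp [insertSorted, h]
    · simp only [insertSorted, if_neg h]
      exact (ih.cons y).trans (List.Perm.swap x y ys)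

theorem mem_insertSorted {x z : String} {l : List String} (h : z ∈ insertSorted l x) :
    z = x ∨ z ∈ l := by
  have := (insertSorted_perm x l).mem_iff.mp h
  simpa using this

theorem insertSorted_pairwise (x : String) :
    ∀ (l : List String), l.Pairwise (· ≤ ·) → (insertSorted l x).Pairwise (· ≤ ·) := by
  intro l
  induction l with
  | nil => intro _; simp [insertSorted]
  | cons y ys ih =>
    intro hp
    rw [List.pairwise_cons] at hp
    obtain ⟨hy, hys⟩ := hp
    by_cases h : x < y
    · rw [insertSorted, if_pos h, List.pairwise_cons]
      refine ⟨?_, List.pairwise_cons.mpr ⟨hy, hys⟩⟩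
      intro z hz
      rcases List.mem_cons.mp hz with rfl | hz
      · exact le_of_lt h
      · exact le_trans (le_of_lt h) (hy z hz)
    · rw [insertSorted, if_neg h, List.pairwise_cons]
      refine ⟨?_, ih hys⟩
      intro z hz
      rcases mem_insertSorted hz with rfl | hz
      · exact le_of_not_gt h
      · exact hy z hz

theorem foldl_insertSorted_perm : ∀ (m a : List String), (m.foldl insertSorted a).Perm (a ++ m) := by
  intro m
  induction m with
  | nil => intro a; simp
  | cons x m ih =>
    intro a
    have h1 : (insertSorted a x ++ m).Perm ((x :: a) ++ m) := (insertSorted_perm x a).append_right m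
    exact (ih (insertSorted a x)).trans (h1.trans List.perm_middle.symm)

theorem foldl_insertSorted_pairwise :
    ∀ (m a : List String), a.Pairwise (· ≤ ·) → (m.foldl insertSorted a).Pairwise (· ≤ ·) := by
  intro m
  induction m with
  | nil => intro a h; simpa using h
  | cons x m ih =>
    intro a h
    exact ih _ (insertSorted_pairwise x a h)

-- insertion sort from the empty accumulator IS Python's sorted
theorem foldl_insertSorted_eq_sorted (m : List String) :
    m.foldl insertSorted [] = PySem.List.sorted m (fun x => x) false := by
  have h1 : (m.foldl insertSorted []).Perm m := by simpa using foldl_insertSorted_perm m []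
  have h2 := foldl_insertSorted_pairwise m [] (by simp)
  exact (PySem.List.sorted_id_eq_of_perm_of_pairwise m (m.foldl insertSorted []) h1 h2).symm

-- a pair fold with two disjoint guarded updaters splits into two filtered folds
theorem foldl_two_upd {α : Type} (p q : α → Bool) (f : α → String)
    (u v : List String → String → List String)
    (hpq : ∀ x, p x = true → q x = false) :
    ∀ (l : List α) (a b : List String),
      l.foldl (fun acc x =>
        if p x then (u acc.1 (f x), acc.2)
        else if q x then (acc.1, v acc.2 (f x))
        else acc) (a, b)
      = (((l.filter p).map f).foldl u a, ((l.filter q).map f).foldl v b) := by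
  intro l
  induction l with
  | nil => intro a b; simp
  | cons x l ih =>
    intro a b
    by_cases hp : p x = true
    · simp [List.foldl_cons, hp, hpq x hp, ih]
    · by_cases hq : q x = true
      · simp [List.foldl_cons, hp, hq, ih]
      · simp [List.foldl_cons, hp, hq, ih]

-- B's dict-shaped fold equals two per-school insertion-sort folds
theorem altFold_shape (gender : List String) (networth : List Int) :
    ∀ (l : List (Int × String)) (a b : List String),
      l.foldl (altStep gender networth) (PySem.Dict.mk [("St. Jude", a), ("Constance Billard", b)])
      = PySem.Dict.mk
          [("St. Jude",
            (((l.filter (fun pp => (PySem.List.pyGetD gender pp.1 "" == "boy") && decide (1 ≤ PySem.List.pyGetD networth pp.1 0))).map (·.2)).foldl insertSorted a)),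
           ("Constance Billard",
            (((l.filter (fun pp => (PySem.List.pyGetD gender pp.1 "" == "girl") && decide (1 ≤ PySem.List.pyGetD networth pp.1 0))).map (·.2)).foldl insertSorted b))] := by
  intro l
  induction l with
  | nil => intro a b; simp
  | cons pp l ih =>
    intro a b
    by_cases hb : PySem.List.pyGetD gender pp.1 "" = "boy"
    · by_cases hw : (1 : Int) ≤ PySem.List.pyGetD networth pp.1 0
      · simp only [List.foldl_cons, altStep, hb]
        rw [show schoolOfDict.get? "boy" = some "St. Jude" from rfl]
        simp only [decide_eq_true_eq, if_pos hw]
        rw [show PySem.Dict.getD (PySem.Dict.mk [("St. Jude", a), ("Constance Billard", b)]) "St. Jude" [] = a by simp [PySem.Dict.getD, PySem.Dict.get?]]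
        rw [show PySem.Dict.insert (PySem.Dict.mk [("St. Jude", a), ("Constance Billard", b)]) "St. Jude" (insertSorted a pp.2) = PySem.Dict.mk [("St. Jude", insertSorted a pp.2), ("Constance Billard", b)] by simp [PySem.Dict.insert, PySem.Dict.contains]]
        rw [ih]
        simp [hb, hw]
      · simp only [List.foldl_cons, altStep, hb]
        rw [show schoolOfDict.get? "boy" = some "St. Jude" from rfl]
        simp only [decide_eq_true_eq, if_neg hw]
        rw [ih]
        simp [hb, hw]
    · by_cases hg : PySem.List.pyGetD gender pp.1 "" = "girl"
      · by_cases hw : (1 : Int) ≤ PySem.List.pyGetD networth pp.1 0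
        · simp only [List.foldl_cons, altStep, hg]
          rw [show schoolOfDict.get? "girl" = some "Constance Billard" from rfl]
          simp only [decide_eq_true_eq, if_pos hw]
          rw [show PySem.Dict.getD (PySem.Dict.mk [("St. Jude", a), ("Constance Billard", b)]) "Constance Billard" [] = b by simp [PySem.Dict.getD, PySem.Dict.get?]]
          rw [show PySem.Dict.insert (PySem.Dict.mk [("St. Jude", a), ("Constance Billard", b)]) "Constance Billard" (insertSorted b pp.2) = PySem.Dict.mk [("St. Jude", a), ("Constance Billard", insertSorted b pp.2)] by simp [PySem.Dict.insert, PySem.Dict.contains]]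
          rw [ih]
          simp [hg, hw]
        · simp only [List.foldl_cons, altStep, hg]
          rw [show schoolOfDict.get? "girl" = some "Constance Billard" from rfl]
          simp only [decide_eq_true_eq, if_neg hw]
          rw [ih]
          simp [hg, hw]
      · simp only [List.foldl_cons, altStep]
        have hb' : ("boy" == PySem.List.pyGetD gender pp.1 "") = false := by simp [Ne.symm hb]
        have hg' : ("girl" == PySem.List.pyGetD gender pp.1 "") = false := by simp [Ne.symm hg]
        rw [show schoolOfDict.get? (PySem.List.pyGetD gender pp.1 "") = none by
          simp [schoolOfDict, PySem.Dict.get?, List.find?, hb', hg']]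
        rw [ih]
        simp [hb, hg]

-- ===== VERDICT (by name: the statement is the Claim_ definition above) =====
theorem stayInSchool_spec : Claim_equal_stayInSchool := by
  intro people networth gender _ _
  unfold Spec_stayInSchool stayInSchool stayInSchool_alt
  simp only [altFold_shape]
  simp only [foldl_two_upd
        (fun (pp : Int × String) => (PySem.List.pyGetD gender pp.1 "" == "boy") && decide (1 ≤ PySem.List.pyGetD networth pp.1 0))
        (fun (pp : Int × String) => (PySem.List.pyGetD gender pp.1 "" == "girl") && decide (1 ≤ PySem.List.pyGetD networth pp.1 0))
        (·.2) (fun l x => l ++ [x]) (fun l x => l ++ [x])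
        (by intro x hx; simp at hx ⊢; intro h; rw [hx.1] at h; exact absurd h (by decide))]
  simp only [PySem.List.foldl_append_singleton, List.nil_append]
  rw [foldl_insertSorted_eq_sorted, foldl_insertSorted_eq_sorted]
  set sjs := PySem.List.sorted
      (((PySem.List.enumerate people 0).filter
          (fun pp => (PySem.List.pyGetD gender pp.1 "" == "boy") && decide (1 ≤ PySem.List.pyGetD networth pp.1 0))).map (·.2))
      (fun x => x) false with hsjs
  set cbs := PySem.List.sorted
      (((PySem.List.enumerate people 0).filter
          (fun pp => (PySem.List.pyGetD gender pp.1 "" == "girl") && decide (1 ≤ PySem.List.pyGetD networth pp.1 0))).map (·.2))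
      (fun x => x) false with hcbs
  by_cases h1 : sjs = [] <;> by_cases h2 : cbs = [] <;>
    simp [h1, h2, List.length_eq_zero_iff, Nat.one_le_iff_ne_zero]
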